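-- pv_equiv track=rewrite | github.com/neica200/Qr_reader_and_writer | qr.py | calculeaza_format
-- ===== SOURCE A (Python) =====
-- def calculeaza_format(ec_level, masca):
--     cod_format_initial = (ec_level << 3) | masca  # Concatenăm ECL și masca (5 biți)
--     generator_bch = 0b10100110111  # Polinom pentru checksum BCH
--     cod_cu_spatiu = cod_format_initial << 10
--     while cod_cu_spatiu.bit_length() > 10:
--         shift = cod_cu_spatiu.bit_length() - generator_bch.bit_length()
--         cod_cu_spatiu ^= generator_bch << shift
--     checksum = cod_cu_spatiu
--     cod_format_complet = (cod_format_initial << 10) | checksum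
--     # Aplicăm masca XOR finală pentru cod format
--     masca_format = 0b101010000010010
--     cod_format_final = cod_format_complet ^ masca_format
--     return f"{cod_format_final:015b}"
-- ===== SOURCE B (Python) =====
-- def calculeaza_format(ec_level, masca):
--     cod_format_initial = (ec_level << 3) | masca
--     generator_bch = 0b10100110111
--     # stream the bits of cod_format_initial, then ten zero bits, through a 10-bit BCH LFSR
--     reg = 0
--     for i in range(cod_format_initial.bit_length() - 1, -1, -1):
--         reg = (reg << 1) | ((cod_format_initial >> i) & 1)
--         if reg & 0b10000000000:
--             reg ^= generator_bch
--     for _ in range(10):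
--         reg = reg << 1
--         if reg & 0b10000000000:
--             reg ^= generator_bch
--     cod_format_final = ((cod_format_initial << 10) | reg) ^ 0b101010000010010
--     return f"{cod_format_final:015b}"
-- ===== Notes on version B (the rewrite author's own statement) =====
-- stated objective: alternative
-- what changed: The whole-word BCH long division (repeatedly realigning the generator with bit_length and XORing it off) is replaced by a bit-streaming LFSR: the format bits plus ten zero bits are fed one at a time through a 10-bit shift register that conditionally XORs the generator, so no bit_length/shift realignment is ever computed inside the loop.
-- outside the precondition, e.g. on calculeaza_format(-5, 0): A returns '-101010101011111', B returns '-1100101010100001'; on calculeaza_format(-1, 0): A does not finish within the time limit, B returns '-100100000111100'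
import Mathlib
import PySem

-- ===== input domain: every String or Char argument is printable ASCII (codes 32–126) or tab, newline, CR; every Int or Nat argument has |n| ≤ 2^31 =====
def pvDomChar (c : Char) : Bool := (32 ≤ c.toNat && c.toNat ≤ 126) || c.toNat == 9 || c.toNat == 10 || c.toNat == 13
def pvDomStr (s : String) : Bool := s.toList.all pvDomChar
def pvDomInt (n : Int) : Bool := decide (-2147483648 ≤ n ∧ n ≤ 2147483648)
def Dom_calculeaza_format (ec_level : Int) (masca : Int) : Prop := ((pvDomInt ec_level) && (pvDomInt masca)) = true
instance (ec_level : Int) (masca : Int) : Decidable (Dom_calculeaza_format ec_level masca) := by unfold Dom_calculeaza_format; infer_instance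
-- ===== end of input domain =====

-- B replaces A's whole-word BCH long division by a bit-streaming 10-bit LFSR (alternative
-- decomposition, same cost); equality is proved on the natural domain 0 ≤ ec_level, 0 ≤ masca.

-- f"{x:015b}": binary digits zero-padded to total width 15, sign first (shared formatting
-- construct of both Pythons; PySem.Int.toBinChars is format(x, 'b'))
def pvFormat015b (n : Int) : String :=
  let ds := PySem.Int.toBinChars n
  if n < 0 then String.mk ('-' :: (List.replicate (15 - ds.length) '0' ++ ds.tail))
  else String.mk (List.replicate (15 - ds.length) '0' ++ ds)

-- ===== PORT A =====
-- A's `while cod_cu_spatiu.bit_length() > 10` loop.  The fuel argument only makes the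
-- recursion total (Python A diverges on some negative inputs, outside Pre_); on every
-- input of Pre_ the loop exits before the fuel runs out (proved below).
def pvDivLoop : Nat → Int → Int
  | 0, c => c
  | f+1, c =>
    if PySem.Int.bitLength c > 10 then
      pvDivLoop f (PySem.Int.bxor c ((1335 : Int) <<< (PySem.Int.bitLength c - 11)))
    else c

def calculeaza_format (ec_level : Int) (masca : Int) : String :=
  let cod_format_initial := PySem.Int.bor (ec_level <<< 3) masca
  let cod_cu_spatiu := cod_format_initial <<< 10
  let checksum := pvDivLoop (PySem.Int.bitLength cod_cu_spatiu) cod_cu_spatiu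
  let cod_format_complet := PySem.Int.bor (cod_format_initial <<< 10) checksum
  pvFormat015b (PySem.Int.bxor cod_format_complet 21522)

-- ===== PORT B =====
-- Source B: feed the bits of cod_format_initial (high to low), then ten zero bits, through a
-- 10-bit LFSR register.  `i.toNat` is exact: every i produced by range(bit_length-1,-1,-1)
-- is nonnegative.
def calculeaza_format_alt (ec_level : Int) (masca : Int) : String :=
  let cod_format_initial := PySem.Int.bor (ec_level <<< 3) masca
  let reg1 := (PySem.List.pyRange ((PySem.Int.bitLength cod_format_initial : Int) - 1) (-1) (-1)).foldl
    (fun (reg : Int) (i : Int) =>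
      let reg' := PySem.Int.bor (reg <<< 1) (PySem.Int.band (cod_format_initial >>> i.toNat) 1)
      if PySem.Int.band reg' 1024 ≠ 0 then PySem.Int.bxor reg' 1335 else reg') 0
  let reg2 := (PySem.List.pyRange 0 10 1).foldl
    (fun (reg : Int) (_ : Int) =>
      let reg' := reg <<< 1
      if PySem.Int.band reg' 1024 ≠ 0 then PySem.Int.bxor reg' 1335 else reg') reg1
  pvFormat015b (PySem.Int.bxor (PySem.Int.bor (cod_format_initial <<< 10) reg2) 21522)

-- ===== PRECONDITION & SPEC =====
-- Pre_ restricts to the natural QR domain of nonnegative arguments: on negative arguments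
-- (outside any QR use) A's while loop diverges for many inputs (e.g. (-1, 0)) and elsewhere
-- returns accidental negative binary strings.
def Pre_calculeaza_format (ec_level : Int) (masca : Int) : Prop := 0 ≤ ec_level ∧ 0 ≤ masca
instance (ec_level : Int) (masca : Int) : Decidable (Pre_calculeaza_format ec_level masca) := by
  unfold Pre_calculeaza_format; infer_instance
def pvWitness_calculeaza_format : Int × Int := (1, 3)

def Spec_calculeaza_format (ec_level : Int) (masca : Int) (out : String) : Prop := out = calculeaza_format_alt ec_level masca
instance (ec_level : Int) (masca : Int) (out : String) : Decidable (Spec_calculeaza_format ec_level masca out) := by unfold Spec_calculeaza_format; infer_instance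

-- ===== CLAIM (what is proved, stated in full; the proofs are below) =====
def Claim_equal_calculeaza_format : Prop := ∀ (ec_level : Int) (masca : Int), Dom_calculeaza_format ec_level masca → Pre_calculeaza_format ec_level masca → Spec_calculeaza_format ec_level masca (calculeaza_format ec_level masca)

-- ===== LEMMAS AND PROOFS =====

-- bit length of a natural number, as Python computes it
def pvL (c : Nat) : Nat := PySem.Int.bitLength (c : Int)

theorem pvL_lt_pow (c : Nat) : c < 2 ^ pvL c := by
  have h1 := PySem.Int.lt_two_pow_bitLength (c : Int)
  simpa [pvL] using h1

theorem pvL_pow_le (c : Nat) (hc : c ≠ 0) : 2 ^ (pvL c - 1) ≤ c := by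
  have h2 := PySem.Int.two_pow_bitLength_le (c : Int) (by exact_mod_cast hc)
  simpa [pvL] using h2

theorem pvL_zero : pvL 0 = 0 := by decide

theorem pvL_le_iff (c n : Nat) : pvL c ≤ n ↔ c < 2 ^ n := by
  constructor
  · intro h
    exact lt_of_lt_of_le (pvL_lt_pow c) (Nat.pow_le_pow_right (by norm_num) h)
  · intro h
    rcases Nat.eq_zero_or_pos c with rfl | hc
    · rw [pvL_zero]; omega
    · by_contra hle
      have h2 := pvL_pow_le c hc.ne'
      have h3 : 2 ^ n ≤ 2 ^ (pvL c - 1) := Nat.pow_le_pow_right (by norm_num) (by omega)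
      omega

theorem pvL_eq_iff (c n : Nat) : pvL c = n + 1 ↔ 2 ^ n ≤ c ∧ c < 2 ^ (n + 1) := by
  have h1 := pvL_le_iff c n
  have h2 := pvL_le_iff c (n + 1)
  omega

theorem pvL_double (m b : Nat) (hm : 0 < m) (hb : b < 2) : pvL (2 * m + b) = pvL m + 1 := by
  obtain ⟨k, hk⟩ : ∃ k, pvL m = k + 1 := by
    have h0 := (pvL_le_iff m 0).1
    refine ⟨pvL m - 1, ?_⟩
    by_contra h
    have : pvL m = 0 := by omega
    have := h0 (by omega)
    omega
  have hmk := (pvL_eq_iff m k).1 hk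
  rw [hk, pvL_eq_iff, pow_succ, pow_succ] at *
  omega

theorem pvTestBit_true (x k : Nat) (h1 : 2 ^ k ≤ x) (h2 : x < 2 ^ (k + 1)) :
    x.testBit k = true := by
  rw [Nat.testBit_eq_decide_div_mod_eq]
  have hd : x / 2 ^ k = 1 := Nat.div_eq_of_lt_le (by omega) (by rw [pow_succ] at h2; omega)
  simp [hd]

theorem pvTopCancel (k a b : Nat) (ha1 : 2 ^ k ≤ a) (ha2 : a < 2 ^ (k + 1))
    (hb1 : 2 ^ k ≤ b) (hb2 : b < 2 ^ (k + 1)) : a ^^^ b < 2 ^ k := by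
  apply Nat.lt_pow_two_of_testBit
  intro i hik
  rw [Nat.testBit_xor]
  rcases eq_or_lt_of_le hik with rfl | hik'
  · rw [pvTestBit_true a k ha1 ha2, pvTestBit_true b k hb1 hb2]; rfl
  · have hi : 2 ^ (k + 1) ≤ 2 ^ i := Nat.pow_le_pow_right (by norm_num) hik'
    rw [Nat.testBit_lt_two_pow (by omega), Nat.testBit_lt_two_pow (by omega)]; rfl

theorem pvRem_decr (c : Nat) (h : 10 < pvL c) :
    pvL (c ^^^ (1335 <<< (pvL c - 11))) < pvL c := by
  set n := pvL c - 11 with hn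
  have hc : pvL c = (n + 10) + 1 := by omega
  have hb := (pvL_eq_iff c (n + 10)).1 hc
  have hsh : 1335 <<< n = 1335 * 2 ^ n := Nat.shiftLeft_eq 1335 n
  have hg1 : 2 ^ (n + 10) ≤ 1335 <<< n := by
    rw [hsh]; calc 2 ^ (n + 10) = 1024 * 2 ^ n := by rw [pow_add]; norm_num; ring
    _ ≤ 1335 * 2 ^ n := Nat.mul_le_mul_right _ (by norm_num)
  have hg2 : 1335 <<< n < 2 ^ (n + 10 + 1) := by
    rw [hsh]; calc 1335 * 2 ^ n < 2048 * 2 ^ n := (Nat.mul_lt_mul_right (Nat.two_pow_pos n)).2 (by norm_num)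
    _ = 2 ^ (n + 10 + 1) := by rw [pow_add]; norm_num; ring
  have hx : c ^^^ (1335 <<< n) < 2 ^ (n + 10) := pvTopCancel (n + 10) c _ hb.1 hb.2 hg1 hg2
  have := (pvL_le_iff (c ^^^ (1335 <<< n)) (n + 10)).2 hx
  omega

def pvRem (c : Nat) : Nat :=
  if h : 10 < pvL c then pvRem (c ^^^ (1335 <<< (pvL c - 11))) else c
termination_by pvL c
decreasing_by exact pvRem_decr c h

def pvStep (r : Nat) : Nat := if r &&& 1024 ≠ 0 then r ^^^ 1335 else r

theorem pvRem_small (c : Nat) (h : pvL c ≤ 10) : pvRem c = c := by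
  rw [pvRem]; rw [dif_neg]; omega

theorem pvDblXor (m b t : Nat) (hb : b < 2) :
    (2 * m + b) ^^^ (2 * t) = 2 * (m ^^^ t) + b := by
  interval_cases b
  · have := Nat.xor_bit false m false t
    simpa [Nat.bit_val] using this
  · have := Nat.xor_bit true m false t
    simpa [Nat.bit_val] using this

theorem pvBandLow (x : Nat) (h : x < 2 ^ 10) : x &&& 1024 = 0 := by
  have : (1024 : Nat) = 2 ^ 10 := by norm_num
  rw [this, Nat.and_two_pow, Nat.testBit_lt_two_pow h]; rfl

theorem pvBandHigh (x : Nat) (h1 : 2 ^ 10 ≤ x) (h2 : x < 2 ^ 11) : x &&& 1024 ≠ 0 := by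
  have : (1024 : Nat) = 2 ^ 10 := by norm_num
  rw [this, Nat.and_two_pow, pvTestBit_true x 10 h1 h2]
  norm_num

theorem pvKey (m b : Nat) (hb : b < 2) : pvRem (2 * m + b) = pvStep (2 * pvRem m + b) := by
  suffices H : ∀ n m b, b < 2 → pvL m = n → pvRem (2 * m + b) = pvStep (2 * pvRem m + b) from
    H (pvL m) m b hb rfl
  intro n
  induction n using Nat.strong_induction_on with
  | _ n ih =>
    intro m b hb hL
    by_cases h : 10 < pvL m
    · have hm : 0 < m := by
        rcases Nat.eq_zero_or_pos m with rfl | hm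
        · rw [pvL_zero] at h; omega
        · exact hm
      have hdl : pvL (2 * m + b) = pvL m + 1 := pvL_double m b hm hb
      have hRm : pvRem m = pvRem (m ^^^ (1335 <<< (pvL m - 11))) := by
        rw [pvRem, dif_pos h]
      rw [pvRem, dif_pos (by omega : 10 < pvL (2 * m + b))]
      have hsh : pvL (2 * m + b) - 11 = (pvL m - 11) + 1 := by omega
      have hshl : (1335 : Nat) <<< ((pvL m - 11) + 1) = 2 * (1335 <<< (pvL m - 11)) := by
        rw [Nat.shiftLeft_succ]
      rw [hsh, hshl, pvDblXor m b _ hb]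
      have hlt : pvL (m ^^^ (1335 <<< (pvL m - 11))) < n := by
        have := pvRem_decr m h; omega
      rw [ih _ hlt _ b hb rfl, hRm]
    · have hm10 : m < 2 ^ 10 := (pvL_le_iff m 10).1 (by omega)
      rw [pvRem_small m (by omega)]
      by_cases h2 : 2 * m + b < 2 ^ 10
      · rw [pvRem_small _ ((pvL_le_iff _ 10).2 h2)]
        unfold pvStep
        rw [if_neg]
        simp [pvBandLow _ h2]
      · have hb1 : 2 ^ 10 ≤ 2 * m + b := by omega
        have hb2 : 2 * m + b < 2 ^ 11 := by omega
        have hL11 : pvL (2 * m + b) = 10 + 1 := (pvL_eq_iff _ 10).2 ⟨hb1, hb2⟩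
        rw [pvRem, dif_pos (by omega : 10 < pvL (2 * m + b))]
        have h0 : pvL (2 * m + b) - 11 = 0 := by omega
        rw [h0, Nat.shiftLeft_zero]
        have hxc : (2 * m + b) ^^^ 1335 < 2 ^ 10 :=
          pvTopCancel 10 _ 1335 hb1 hb2 (by norm_num) (by norm_num)
        rw [pvRem_small _ ((pvL_le_iff _ 10).2 hxc)]
        unfold pvStep
        rw [if_pos (pvBandHigh _ hb1 hb2)]

-- Nat-level copy of A's division loop (same fuel recursion)
def pvDivN : Nat → Nat → Nat
  | 0, c => c
  | f+1, c => if 10 < pvL c then pvDivN f (c ^^^ (1335 <<< (pvL c - 11))) else c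

theorem pvDivN_eq (f c : Nat) (h : pvL c ≤ 10 + f) : pvDivN f c = pvRem c := by
  induction f generalizing c with
  | zero => simp only [pvDivN]; rw [pvRem_small c (by omega)]
  | succ f ih =>
    by_cases hc : 10 < pvL c
    · rw [show pvDivN (f+1) c = pvDivN f (c ^^^ (1335 <<< (pvL c - 11))) from by
        rw [pvDivN, if_pos hc]]
      rw [ih _ (by have := pvRem_decr c hc; omega)]
      conv_rhs => rw [pvRem, dif_pos hc]
    · rw [pvDivN, if_neg hc, pvRem_small c (by omega)]

theorem pvOrDouble (r b : Nat) (hb : b < 2) : (2 * r) ||| b = 2 * r + b := by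
  interval_cases b
  · simp
  · have := Nat.lor_bit false r true 0
    simpa [Nat.bit_val] using this

theorem pvStream (k N : Nat) :
    (List.range k).foldl (fun r j => pvStep (2 * r + ((N >>> (k - 1 - j)) &&& 1))) 0
      = pvRem (N % 2 ^ k) := by
  induction k generalizing N with
  | zero =>
    simp only [List.range_zero, List.foldl_nil, Nat.pow_zero, Nat.mod_one]
    rw [pvRem_small 0 (by rw [pvL_zero]; omega)]
  | succ k ih =>
    rw [List.range_succ, List.foldl_append]
    have hcongr : (List.range k).foldl
          (fun r j => pvStep (2 * r + ((N >>> (k + 1 - 1 - j)) &&& 1))) 0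
        = (List.range k).foldl
          (fun r j => pvStep (2 * r + (((N / 2) >>> (k - 1 - j)) &&& 1))) 0 := by
      apply List.foldl_ext
      intro r j hj
      have hj' : j < k := List.mem_range.mp hj
      have hsh : k + 1 - 1 - j = (k - 1 - j) + 1 := by omega
      rw [hsh, Nat.add_comm (k - 1 - j) 1, Nat.shiftRight_add, Nat.shiftRight_one]
    rw [hcongr, ih (N / 2)]
    simp only [List.foldl_cons, List.foldl_nil]
    have hsh0 : k + 1 - 1 - k = 0 := by omega
    rw [hsh0, Nat.shiftRight_zero, Nat.and_one_is_mod]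
    rw [← pvKey (N / 2 % 2 ^ k) (N % 2) (by omega)]
    congr 1
    rw [pow_succ, mul_comm (2 ^ k) 2, Nat.mod_mul]
    omega

theorem pvFeed (j c : Nat) :
    (List.range j).foldl (fun r _ => pvStep (2 * r)) (pvRem c) = pvRem (c <<< j) := by
  induction j with
  | zero => simp
  | succ j ih =>
    rw [List.range_succ, List.foldl_append, ih]
    simp only [List.foldl_cons, List.foldl_nil]
    rw [show 2 * pvRem (c <<< j) = 2 * pvRem (c <<< j) + 0 by omega,
      ← pvKey (c <<< j) 0 (by omega)]
    congr 1
    rw [Nat.shiftLeft_succ]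
    omega

-- fold a list of Ints with a Nat-valued simulation
theorem pvFoldlCast {α : Type} (l : List α) (fI : Int → α → Int) (fN : Nat → α → Nat)
    (h : ∀ (r : Nat) (a : α), a ∈ l → fI (↑r) a = ↑(fN r a)) :
    ∀ r : Nat, l.foldl fI ↑r = ↑(l.foldl fN r) := by
  induction l with
  | nil => intro r; rfl
  | cons x xs ih =>
    intro r
    simp only [List.foldl_cons]
    rw [h r x (by simp), ih (fun r a ha => h r a (by simp [ha]))]

-- cast micro-lemmas (numeral forms of the PySem natCast lemmas)
theorem pvBand1 (x : Nat) : PySem.Int.band (x : Int) 1 = ((x &&& 1 : Nat) : Int) := by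
  exact_mod_cast PySem.Int.band_natCast x 1
theorem pvBand1024 (x : Nat) : PySem.Int.band (x : Int) 1024 = ((x &&& 1024 : Nat) : Int) := by
  exact_mod_cast PySem.Int.band_natCast x 1024
theorem pvBxor1335 (x : Nat) : PySem.Int.bxor (x : Int) 1335 = ((x ^^^ 1335 : Nat) : Int) := by
  exact_mod_cast PySem.Int.bxor_natCast x 1335
theorem pvBxorMask (x : Nat) : PySem.Int.bxor (x : Int) 21522 = ((x ^^^ 21522 : Nat) : Int) := by
  exact_mod_cast PySem.Int.bxor_natCast x 21522

theorem pvDivCast (f c : Nat) : pvDivLoop f (c : Int) = ((pvDivN f c : Nat) : Int) := by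
  induction f generalizing c with
  | zero => rfl
  | succ f ih =>
    rw [pvDivLoop, pvDivN]
    by_cases hc : 10 < pvL c
    · rw [if_pos (show PySem.Int.bitLength (c : Int) > 10 from hc), if_pos hc]
      have hx : PySem.Int.bxor (c : Int) ((1335 : Int) <<< (PySem.Int.bitLength (c : Int) - 11))
          = ((c ^^^ (1335 <<< (pvL c - 11)) : Nat) : Int) := by
        rw [show ((1335 : Int) <<< (PySem.Int.bitLength (c : Int) - 11))
            = (((1335 <<< (pvL c - 11) : Nat)) : Int) from rfl]
        exact PySem.Int.bxor_natCast c _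
      rw [hx]; exact ih _
    · rw [if_neg (show ¬ PySem.Int.bitLength (c : Int) > 10 from hc), if_neg hc]

-- a fold that ignores its elements depends only on the length of the list
theorem pvFoldlConst {α β γ : Type} (f : γ → γ) (l : List α) (l' : List β) (x : γ)
    (h : l.length = l'.length) :
    l.foldl (fun r _ => f r) x = l'.foldl (fun r _ => f r) x := by
  induction l generalizing l' x with
  | nil => cases l' with | nil => rfl | cons y ys => simp at h
  | cons a as ih =>
    cases l' with
    | nil => simp at h
    | cons y ys => simp only [List.foldl_cons]; exact ih ys (f x) (by simpa using h)

theorem pvPortA (a b : Nat) :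
    calculeaza_format (a : Int) (b : Int)
      = pvFormat015b (((((a <<< 3 ||| b) <<< 10) ||| pvRem ((a <<< 3 ||| b) <<< 10)) ^^^ 21522 : Nat) : Int) := by
  simp only [calculeaza_format]
  rw [show ((a : Int) <<< 3) = ((a <<< 3 : Nat) : Int) from rfl, PySem.Int.bor_natCast]
  rw [show (((a <<< 3 ||| b : Nat) : Int) <<< 10) = (((a <<< 3 ||| b) <<< 10 : Nat) : Int) from rfl]
  rw [show PySem.Int.bitLength (((a <<< 3 ||| b) <<< 10 : Nat) : Int) = pvL ((a <<< 3 ||| b) <<< 10) from rfl]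
  rw [pvDivCast, pvDivN_eq _ _ (by omega), PySem.Int.bor_natCast, pvBxorMask]

theorem pvPortB (a b : Nat) :
    calculeaza_format_alt (a : Int) (b : Int)
      = pvFormat015b (((((a <<< 3 ||| b) <<< 10) ||| pvRem ((a <<< 3 ||| b) <<< 10)) ^^^ 21522 : Nat) : Int) := by
  simp only [calculeaza_format_alt]
  rw [show ((a : Int) <<< 3) = ((a <<< 3 : Nat) : Int) from rfl, PySem.Int.bor_natCast]
  set n := a <<< 3 ||| b with hn
  rw [show PySem.Int.bitLength ((n : Nat) : Int) = pvL n from rfl]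
  rw [PySem.List.pyRange_neg_one]
  rw [show (((pvL n : Int) - 1) - (-1)).toNat = pvL n by omega]
  rw [List.foldl_map]
  have helem : ∀ (r : Nat) (k : Nat), k ∈ List.range (pvL n) →
      (if PySem.Int.band (PySem.Int.bor ((r : Int) <<< 1)
            (PySem.Int.band ((n : Int) >>> (((pvL n : Int) - 1 - (k : Int)).toNat)) 1)) 1024 ≠ 0 then
         PySem.Int.bxor (PySem.Int.bor ((r : Int) <<< 1)
            (PySem.Int.band ((n : Int) >>> (((pvL n : Int) - 1 - (k : Int)).toNat)) 1)) 1335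
       else PySem.Int.bor ((r : Int) <<< 1)
            (PySem.Int.band ((n : Int) >>> (((pvL n : Int) - 1 - (k : Int)).toNat)) 1))
      = ((pvStep (2 * r + ((n >>> (pvL n - 1 - k)) &&& 1)) : Nat) : Int) := by
    intro r k hk
    have hk' : k < pvL n := List.mem_range.mp hk
    have htn : ((pvL n : Int) - 1 - (k : Int)).toNat = pvL n - 1 - k := by omega
    rw [htn]
    rw [show ((n : Int) >>> (pvL n - 1 - k)) = ((n >>> (pvL n - 1 - k) : Nat) : Int) from rfl]
    rw [pvBand1]
    rw [show ((r : Int) <<< 1) = ((r <<< 1 : Nat) : Int) from rfl, PySem.Int.bor_natCast]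
    have hsh : r <<< 1 = 2 * r := by rw [Nat.shiftLeft_eq]; ring
    have hbit : (n >>> (pvL n - 1 - k)) &&& 1 < 2 := by
      rw [Nat.and_one_is_mod]; omega
    rw [hsh, pvOrDouble _ _ hbit, pvBand1024, pvBxor1335]
    simp only [pvStep]
    by_cases hz : (2 * r + ((n >>> (pvL n - 1 - k)) &&& 1)) &&& 1024 = 0
    · rw [if_neg (by rw [hz]; norm_num), if_neg (fun hc => hc hz)]
    · rw [if_pos (by exact_mod_cast hz), if_pos hz]
  have h1 := pvFoldlCast (List.range (pvL n))
      (fun x y => if PySem.Int.band (PySem.Int.bor (x <<< 1)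
            (PySem.Int.band ((n : Int) >>> (((pvL n : Int) - 1 - (y : Int)).toNat)) 1)) 1024 ≠ 0 then
          PySem.Int.bxor (PySem.Int.bor (x <<< 1)
            (PySem.Int.band ((n : Int) >>> (((pvL n : Int) - 1 - (y : Int)).toNat)) 1)) 1335
        else PySem.Int.bor (x <<< 1)
            (PySem.Int.band ((n : Int) >>> (((pvL n : Int) - 1 - (y : Int)).toNat)) 1))
      (fun r k => pvStep (2 * r + ((n >>> (pvL n - 1 - k)) &&& 1))) helem 0
  rw [Nat.cast_zero] at h1
  rw [h1, pvStream (pvL n) n, Nat.mod_eq_of_lt (pvL_lt_pow n)]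
  have helem2 : ∀ (r : Nat) (i : Int), i ∈ PySem.List.pyRange 0 10 1 →
      (if PySem.Int.band ((r : Int) <<< 1) 1024 ≠ 0 then
         PySem.Int.bxor ((r : Int) <<< 1) 1335
       else (r : Int) <<< 1)
      = ((pvStep (2 * r) : Nat) : Int) := by
    intro r i _
    rw [show ((r : Int) <<< 1) = ((r <<< 1 : Nat) : Int) from rfl]
    have hsh : r <<< 1 = 2 * r := by rw [Nat.shiftLeft_eq]; ring
    rw [hsh, pvBand1024, pvBxor1335]
    simp only [pvStep]
    by_cases hz : (2 * r) &&& 1024 = 0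
    · rw [if_neg (by rw [hz]; norm_num), if_neg (fun hc => hc hz)]
    · rw [if_pos (by exact_mod_cast hz), if_pos hz]
  have h2 := pvFoldlCast (PySem.List.pyRange 0 10 1)
      (fun reg _ => if PySem.Int.band (reg <<< 1) 1024 ≠ 0 then
          PySem.Int.bxor (reg <<< 1) 1335 else reg <<< 1)
      (fun r _ => pvStep (2 * r)) helem2 (pvRem n)
  rw [h2]
  rw [pvFoldlConst (fun r => pvStep (2 * r)) (PySem.List.pyRange 0 10 1) (List.range 10)
      (pvRem n) (by decide)]
  rw [pvFeed 10 n]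
  rw [show ((n : Int) <<< 10) = ((n <<< 10 : Nat) : Int) from rfl, PySem.Int.bor_natCast, pvBxorMask]

-- ===== VERDICT (by name: the statement is the Claim_ definition above) =====
theorem calculeaza_format_spec : Claim_equal_calculeaza_format := by
  intro e m _ hpre
  obtain ⟨a, rfl⟩ := Int.eq_ofNat_of_zero_le hpre.1
  obtain ⟨b, rfl⟩ := Int.eq_ofNat_of_zero_le hpre.2
  unfold Spec_calculeaza_format
  rw [pvPortA, pvPortB]
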